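-- pv_equiv track=rewrite | github.com/nkyono/PE | misc_funcs/polygonalForms.py | hexNums
-- ===== SOURCE A (Python) =====
-- def hexNums(minLim, maxLim):
--     nums = []
--     x = 1
--     while(True):
--         num = int(x*(2*x-1))
--         if num < maxLim:
--             if num > minLim:
--                 nums.append(num)
--         else:
--             break
--         x = x + 1
--     return nums
-- ===== SOURCE B (Python) =====
-- def hexNums(minLim, maxLim):
--     # bracket the largest x with x*(2x-1) < maxLim by doubling, then binary search
--     hi = 1
--     while hi * (2 * hi - 1) < maxLim:
--         hi *= 2
--     lo = 0
--     while hi - lo > 1: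
--         mid = (lo + hi) // 2
--         if mid * (2 * mid - 1) < maxLim:
--             lo = mid
--         else:
--             hi = mid
--     return [x * (2 * x - 1) for x in range(1, lo + 1) if x * (2 * x - 1) > minLim]
-- ===== Notes on version B (the rewrite author's own statement) =====
-- stated objective: alternative
-- what changed: A scans x = 1, 2, 3, ... testing each hexagonal number against maxLim until one exceeds it; B instead brackets the largest valid x by doubling plus binary search (O(log maxLim) tests) and then emits the list with a single range comprehension filtered by minLim.
import Mathlib
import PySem

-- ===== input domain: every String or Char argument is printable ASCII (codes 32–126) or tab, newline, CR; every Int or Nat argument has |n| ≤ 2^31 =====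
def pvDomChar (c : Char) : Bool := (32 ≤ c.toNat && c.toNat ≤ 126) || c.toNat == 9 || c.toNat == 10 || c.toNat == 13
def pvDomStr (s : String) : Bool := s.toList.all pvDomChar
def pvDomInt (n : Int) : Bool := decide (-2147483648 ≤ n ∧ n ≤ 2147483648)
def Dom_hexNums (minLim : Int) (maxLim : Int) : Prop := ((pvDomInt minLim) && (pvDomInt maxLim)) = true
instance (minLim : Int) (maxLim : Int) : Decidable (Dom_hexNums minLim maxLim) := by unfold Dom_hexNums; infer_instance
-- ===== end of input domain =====

-- B replaces A's linear scan-and-test with a doubling+binary-search bracket of the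
-- largest valid index, then emits the list directly (alternative decomposition).

-- ===== PORT A =====
-- termination helper for A's while-loop: the hexagonal value dominates its index
theorem pvHexGeSelf (x : Int) : x ≤ x * (2 * x - 1) := by
  have h : 0 ≤ x * (x - 1) := by
    by_cases h1 : 1 ≤ x
    · exact mul_nonneg (by omega) (by omega)
    · nlinarith [mul_nonneg (by omega : (0:Int) ≤ -x) (by omega : (0:Int) ≤ 1 - x)]
  nlinarith [h]

def hexLoop (minLim maxLim : Int) (nums : List Int) (x : Int) : List Int :=
  if h : x * (2 * x - 1) < maxLim then
    hexLoop minLim maxLim (if x * (2 * x - 1) > minLim then nums ++ [x * (2 * x - 1)] else nums) (x + 1)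
  else nums
termination_by (maxLim - x).toNat
decreasing_by
  have hx := pvHexGeSelf x
  omega

def hexNums (minLim : Int) (maxLim : Int) : List Int :=
  hexLoop minLim maxLim [] 1

-- ===== PORT B =====
def hexGrow (maxLim : Int) (f : Nat) (hi : Int) : Int :=
  match f with
  | 0 => hi
  | f + 1 => if hi * (2 * hi - 1) < maxLim then hexGrow maxLim f (2 * hi) else hi

-- midpoint bounds used for hexBin's termination (and its correctness proof below)
theorem pvMidBounds (lo hi : Int) (h : lo + 2 ≤ hi) :
    lo + 1 ≤ PySem.Int.floordiv (lo + hi) 2 ∧ PySem.Int.floordiv (lo + hi) 2 ≤ hi - 1 := by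
  constructor
  · rw [PySem.Int.le_floordiv_iff_mul_le (by omega : (0:Int) < 2)]; omega
  · have := (PySem.Int.floordiv_lt_iff_lt_mul (a := lo + hi) (b := 2) (q := hi) (by omega)).2 (by omega)
    omega

-- mid = (lo + hi) // 2 from B's binary-search loop, as a named helper
def pvMid (lo hi : Int) : Int := PySem.Int.floordiv (lo + hi) 2

def hexBin (maxLim lo hi : Int) : Int :=
  if _h : hi - lo > 1 then
    if pvMid lo hi * (2 * pvMid lo hi - 1) < maxLim then hexBin maxLim (pvMid lo hi) hi
    else hexBin maxLim lo (pvMid lo hi)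
  else lo
termination_by (hi - lo).toNat
decreasing_by
  · have := pvMidBounds lo hi (by omega)
    simp only [pvMid]
    omega
  · have := pvMidBounds lo hi (by omega)
    simp only [pvMid]
    omega

def hexNums_alt (minLim : Int) (maxLim : Int) : List Int :=
  let hi := hexGrow maxLim 64 1
  let lo := hexBin maxLim 0 hi
  ((PySem.List.pyRange 1 (lo + 1) 1).filter (fun x => x * (2 * x - 1) > minLim)).map
    (fun x => x * (2 * x - 1))

-- ===== PRECONDITION & SPEC =====
def Spec_hexNums (minLim : Int) (maxLim : Int) (out : List Int) : Prop := out = hexNums_alt minLim maxLim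
instance (minLim : Int) (maxLim : Int) (out : List Int) : Decidable (Spec_hexNums minLim maxLim out) := by unfold Spec_hexNums; infer_instance

-- ===== CLAIM (what is proved, stated in full; the proofs are below) =====
def Claim_equal_hexNums : Prop := ∀ (minLim : Int) (maxLim : Int), Dom_hexNums minLim maxLim → Spec_hexNums minLim maxLim (hexNums minLim maxLim)

-- ===== LEMMAS AND PROOFS =====

-- monotonicity of x ↦ x(2x-1) on the nonnegatives
theorem hexMono (a b : Int) (ha : 0 ≤ a) (hab : a ≤ b) :
    a * (2 * a - 1) ≤ b * (2 * b - 1) := by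
  rcases eq_or_lt_of_le hab with h | h
  · rw [h]
  · nlinarith [mul_nonneg (by omega : (0:Int) ≤ b - a) (by omega : (0:Int) ≤ a + b - 1)]

theorem growPos (maxLim : Int) (f : Nat) : ∀ hi : Int, 1 ≤ hi → 1 ≤ hexGrow maxLim f hi := by
  induction f with
  | zero => intro hi h; simpa [hexGrow] using h
  | succ f ih =>
    intro hi h
    rw [hexGrow]
    split
    · exact ih (2 * hi) (by omega)
    · exact h

theorem growGe (maxLim : Int) (f : Nat) :
    ∀ hi : Int, 1 ≤ hi → maxLim ≤ 2 ^ f * hi →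
      maxLim ≤ hexGrow maxLim f hi * (2 * hexGrow maxLim f hi - 1) := by
  induction f with
  | zero =>
    intro hi h hle
    simp only [hexGrow]
    calc maxLim ≤ 2 ^ 0 * hi := hle
      _ = hi := by ring
      _ ≤ hi * (2 * hi - 1) := pvHexGeSelf hi
  | succ f ih =>
    intro hi h hle
    rw [hexGrow]
    split
    · exact ih (2 * hi) (by omega) (by calc maxLim ≤ 2 ^ (f + 1) * hi := hle
        _ = 2 ^ f * (2 * hi) := by ring)
    · omega

theorem growStop (maxLim : Int) (f : Nat) (hi : Int) (h : ¬ hi * (2 * hi - 1) < maxLim) :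
    hexGrow maxLim f hi = hi := by
  cases f <;> simp [hexGrow, h]

theorem binSpec (maxLim : Int) : ∀ n (lo hi : Int), (hi - lo).toNat = n →
    0 ≤ lo → lo < hi → lo * (2 * lo - 1) < maxLim → maxLim ≤ hi * (2 * hi - 1) →
    0 ≤ hexBin maxLim lo hi ∧ hexBin maxLim lo hi * (2 * hexBin maxLim lo hi - 1) < maxLim ∧
      maxLim ≤ (hexBin maxLim lo hi + 1) * (2 * (hexBin maxLim lo hi + 1) - 1) := by
  intro n
  induction n using Nat.strong_induction_on with
  | _ n ih =>
    intro lo hi hn hlo hlt hlow hhigh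
    rw [hexBin]
    by_cases h : hi - lo > 1
    · rw [dif_pos h]
      have hmid := pvMidBounds lo hi (by omega)
      rw [show PySem.Int.floordiv (lo + hi) 2 = pvMid lo hi from rfl] at hmid
      split
      · exact ih (hi - pvMid lo hi).toNat (by omega) (pvMid lo hi) hi rfl (by omega) (by omega)
          (by assumption) hhigh
      · exact ih (pvMid lo hi - lo).toNat (by omega) lo (pvMid lo hi) rfl hlo (by omega) hlow
          (by omega)
    · rw [dif_neg h]
      have hhi : hi = lo + 1 := by omega
      refine ⟨hlo, hlow, ?_⟩
      rw [← hhi]; exact hhigh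

theorem loopEq (minLim maxLim xe : Int) (hxe0 : 0 ≤ xe)
    (hlt : xe * (2 * xe - 1) < maxLim) (hge : maxLim ≤ (xe + 1) * (2 * (xe + 1) - 1)) :
    ∀ n (x : Int) (acc : List Int), 1 ≤ x → (xe + 1 - x).toNat = n →
      hexLoop minLim maxLim acc x =
        acc ++ ((PySem.List.pyRange x (xe + 1) 1).filter (fun k => k * (2 * k - 1) > minLim)).map
          (fun k => k * (2 * k - 1)) := by
  intro n
  induction n with
  | zero =>
    intro x acc hx hn
    have hxe : xe + 1 ≤ x := by omega
    have hbig : ¬ x * (2 * x - 1) < maxLim := by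
      have := hexMono (xe + 1) x (by omega) hxe
      omega
    rw [hexLoop, dif_neg hbig, PySem.List.pyRange_one_eq_nil (by omega)]
    simp
  | succ n ihn =>
    intro x acc hx hn
    have hxle : x ≤ xe := by omega
    have hsmall : x * (2 * x - 1) < maxLim := by
      have := hexMono x xe (by omega) hxle
      omega
    rw [hexLoop, dif_pos hsmall,
      ihn (x + 1) _ (by omega) (by omega),
      PySem.List.pyRange_one_cons (by omega : x < xe + 1),
      List.filter_cons]
    by_cases hmin : x * (2 * x - 1) > minLim
    · simp [hmin]
    · simp [hmin]

-- ===== VERDICT (by name: the statement is the Claim_ definition above) =====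
theorem hexNums_spec : Claim_equal_hexNums := by
  intro minLim maxLim hdom
  unfold Spec_hexNums hexNums hexNums_alt
  have hdm : maxLim ≤ 2147483648 := by
    simp [Dom_hexNums, pvDomInt] at hdom
    omega
  by_cases hpos : 1 ≤ maxLim
  · have hhi1 : 1 ≤ hexGrow maxLim 64 1 := growPos maxLim 64 1 (by omega)
    have hhige : maxLim ≤ hexGrow maxLim 64 1 * (2 * hexGrow maxLim 64 1 - 1) := by
      refine growGe maxLim 64 1 (by omega) ?_
      norm_num
      omega
    obtain ⟨h0, h1, h2⟩ := binSpec maxLim (hexGrow maxLim 64 1 - 0).toNat 0 (hexGrow maxLim 64 1)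
      rfl (by omega) (by omega) (by omega) hhige
    exact loopEq minLim maxLim (hexBin maxLim 0 (hexGrow maxLim 64 1)) h0 h1 h2
      (hexBin maxLim 0 (hexGrow maxLim 64 1) + 1 - 1).toNat 1 [] (by omega) (by omega)
  · have h1 : ¬ (1:Int) * (2 * 1 - 1) < maxLim := by omega
    rw [hexLoop, dif_neg h1, growStop maxLim 64 1 h1]
    have hb : hexBin maxLim 0 (1:Int) = 0 := by
      rw [hexBin.eq_def]; norm_num
    show ([] : List Int) = List.map (fun x => x * (2 * x - 1))
      (List.filter (fun x => decide (x * (2 * x - 1) > minLim))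
        (PySem.List.pyRange 1 (hexBin maxLim 0 1 + 1) 1))
    rw [hb, PySem.List.pyRange_one_eq_nil (by omega)]
    simp
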